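-- pv_equiv track=rewrite | github.com/deangeckt/CLG-lab-CS-Clf | Miami-Bangor-LAB/categorial_subsequences_length_analysis.py | collect_subsequence_frequencies
-- ===== SOURCE A (Python) =====
-- from collections import Counter
--
-- def subsequences_lengths_extractor(tags_sequence_extracted):
--     tags_sequence_squoshed = []
--     i = 0
--     current_subsequence_length = 0
--     prev_tag = None
--     while i < len(tags_sequence_extracted):
--         curr_tag = tags_sequence_extracted[i]
--         if (prev_tag is None) or (curr_tag == prev_tag):
--             current_subsequence_length += 1
--         else:
--             tags_sequence_squoshed.append((prev_tag, current_subsequence_length))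
--             current_subsequence_length = 1
--         prev_tag = curr_tag
--         i += 1
--
--     if not(current_subsequence_length == 0):
--         tags_sequence_squoshed.append((prev_tag, current_subsequence_length))
--     return tags_sequence_squoshed
--
-- def collect_tag_types(tags_sequence_squoshed):
--     tag_types = []
--     for (tag, subsequence_length) in tags_sequence_squoshed:
--         if tag not in tag_types:
--             tag_types.append(tag)
--     return tag_types
--
-- def convert_to_frequency_vector(frequency_counter):
--     max_key = max(frequency_counter.keys())
--     frequency_vector = [0 for _ in range(max_key+1)]
--     for i, frequency in frequency_counter.items():
--         frequency_vector[i] = frequency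
--     return frequency_vector
--
-- def collect_subsequence_frequencies(tags_sequence_extracted):
--     tags_sequence_squoshed = subsequences_lengths_extractor(tags_sequence_extracted)
--     tag_types = collect_tag_types(tags_sequence_squoshed)
--
--     # Init:
--     tags_subsequence_length_frequency_counters = {}
--     for tag in tag_types:
--         tags_subsequence_length_frequency_counters[tag] = Counter()
--
--     # Collect Frequency Counters:
--     for (tag, subsequence_length) in tags_sequence_squoshed:
--         tags_subsequence_length_frequency_counters[tag].update([subsequence_length])
--
--     # Convert to frequency vectors:
--     tags_subsequence_length_frequency_vectors = {}
--     for tag in tag_types: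
--         tags_subsequence_length_frequency_vectors[tag] = \
--             convert_to_frequency_vector(tags_subsequence_length_frequency_counters[tag])
--
--     return tags_subsequence_length_frequency_vectors
-- ===== SOURCE B (Python) =====
-- from collections import Counter
-- def collect_subsequence_frequencies(tags_sequence_extracted):
--     # Inverted-index approach: record the positions of each tag (dict keyed by
--     # tag, in first-appearance order), then read run lengths off the gaps in
--     # each tag's position list, and densify counts into a frequency vector.
--     positions = {}
--     for i, t in enumerate(tags_sequence_extracted):
--         positions.setdefault(t, []).append(i)
--     result = {}
--     for t, ps in positions.items():
--         lengths = []
--         start = ps[0]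
--         for prev, cur in zip(ps, ps[1:]):
--             if cur != prev + 1:
--                 lengths.append(prev - start + 1)
--                 start = cur
--         lengths.append(ps[-1] - start + 1)
--         c = Counter(lengths)
--         result[t] = [c.get(i, 0) for i in range(max(lengths) + 1)]
--     return result
-- ===== Notes on version B (the rewrite author's own statement) =====
-- stated objective: alternative
-- what changed: A run-length-encodes the sequence into a squashed (tag, length) list and then makes separate tag-type/init/count/convert passes; B never builds runs while scanning: it records each tag's positions in an inverted index (one enumerate pass), then reads the run lengths of each tag off the gaps in its position list and densifies a Counter of them into the frequency vector.
import Mathlib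
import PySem

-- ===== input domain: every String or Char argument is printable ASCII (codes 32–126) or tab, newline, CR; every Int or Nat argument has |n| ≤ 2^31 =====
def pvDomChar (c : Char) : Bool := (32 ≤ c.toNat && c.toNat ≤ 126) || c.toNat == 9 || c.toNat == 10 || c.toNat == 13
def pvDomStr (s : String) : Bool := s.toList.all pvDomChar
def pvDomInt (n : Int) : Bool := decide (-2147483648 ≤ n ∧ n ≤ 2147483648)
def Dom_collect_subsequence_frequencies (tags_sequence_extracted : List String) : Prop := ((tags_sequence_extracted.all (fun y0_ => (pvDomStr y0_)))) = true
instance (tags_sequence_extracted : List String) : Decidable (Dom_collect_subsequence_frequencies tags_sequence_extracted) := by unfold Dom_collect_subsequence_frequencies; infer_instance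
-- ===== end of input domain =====

-- B replaces A's run-length-encoding pipeline by an inverted index: one pass records each
-- tag's positions, then run lengths are read off the gaps in each position list;
-- objective: alternative algorithm (same output, different mechanism).

-- ===== PORT A =====
-- list[i] = v for 0 ≤ i < len(list) (exact there; every index assigned by A below is a
-- run length 1 ≤ i ≤ max, hence in range).
def pvSetAt (v : List Int) (i : Int) (x : Int) : List Int :=
  v.mapIdx (fun j y => if (j : Int) = i then x else y)

-- the while loop of subsequences_lengths_extractor; returns (squoshed, prev_tag, current_subsequence_length)
def pvSleLoop : List String → Option String → Int → List (String × Int) →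
    (List (String × Int) × Option String × Int)
  | [], prev, len, acc => (acc, prev, len)
  | curr :: rest, prev, len, acc =>
    if prev = none ∨ some curr = prev then
      pvSleLoop rest (some curr) (len + 1) acc
    else
      -- prev is some _ here; '.getD ""' only names that value
      pvSleLoop rest (some curr) 1 (acc ++ [(prev.getD "", len)])

def subsequences_lengths_extractor (tags_sequence_extracted : List String) : List (String × Int) :=
  let s := pvSleLoop tags_sequence_extracted none 0 []
  -- final flush: prev_tag is some _ whenever the length is nonzero
  if s.2.2 ≠ 0 then s.1 ++ [(s.2.1.getD "", s.2.2)] else s.1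

def collect_tag_types (tags_sequence_squoshed : List (String × Int)) : List String :=
  tags_sequence_squoshed.foldl (fun ts p => if p.1 ∈ ts then ts else ts ++ [p.1]) []

def convert_to_frequency_vector (frequency_counter : PySem.Dict Int Int) : List Int :=
  -- max(keys) raises on an empty counter; every counter reaching here is nonempty, '.getD 0' is dead
  let maxKey := (PySem.List.max? frequency_counter.keys (fun x => x)).getD 0
  let v0 := (PySem.List.pyRange 0 (maxKey + 1) 1).map (fun _ => (0 : Int))
  frequency_counter.items.foldl (fun v p => pvSetAt v p.1 p.2) v0

def collect_subsequence_frequencies (tags_sequence_extracted : List String) : List (String × List Int) :=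
  let sq := subsequences_lengths_extractor tags_sequence_extracted
  let tagTypes := collect_tag_types sq
  -- Init:
  let counters0 : PySem.Dict String (PySem.Dict Int Int) :=
    tagTypes.foldl (fun d t => d.insert t PySem.Dict.empty) PySem.Dict.empty
  -- Collect Frequency Counters: counters[tag].update([l]); tag is always a key of counters0,
  -- so 'modify' with default empty is exact
  let counters := sq.foldl (fun d p => d.modify p.1 PySem.Dict.empty (fun c => c.modify p.2 0 (· + 1))) counters0
  -- Convert to frequency vectors: counters[tag] never raises (tag ∈ tagTypes), getD is exact
  let out : PySem.Dict String (List Int) :=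
    tagTypes.foldl (fun d t => d.insert t (convert_to_frequency_vector (counters.getD t PySem.Dict.empty))) PySem.Dict.empty
  out.items

-- ===== PORT B =====
-- positions.setdefault(t, []).append(i): insertion-order dict of position lists
def pvPositions (tags_sequence_extracted : List String) : PySem.Dict String (List Int) :=
  (PySem.List.enumerate tags_sequence_extracted).foldl
    (fun d p => d.insert p.2 (d.getD p.2 [] ++ [p.1])) PySem.Dict.empty

-- the 'for prev, cur in zip(ps, ps[1:])' loop; state = (lengths, start)
def pvGapLoop : List (Int × Int) → Int → List Int → (List Int × Int)
  | [], start, acc => (acc, start)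
  | (p, c) :: rest, start, acc =>
    if c ≠ p + 1 then pvGapLoop rest c (acc ++ [p - start + 1])
    else pvGapLoop rest start acc

-- run lengths of one tag from its position list; ps[0]/ps[-1] raise on empty ps, but every
-- ps reaching here is nonempty (a positions entry is created with its first element), so
-- the '.getD 0' defaults are dead
def pvGapLens (ps : List Int) : List Int :=
  let start0 := (PySem.List.pyGet? ps 0).getD 0
  let s := pvGapLoop (ps.zip ps.tail) start0 []
  s.1 ++ [(PySem.List.pyGet? ps (-1)).getD 0 - s.2 + 1]

def collect_subsequence_frequencies_alt (tags_sequence_extracted : List String) : List (String × List Int) :=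
  let positions := pvPositions tags_sequence_extracted
  -- for t, ps in positions.items(): lengths from gaps; c = Counter(lengths);
  -- result[t] = [c.get(i, 0) for i in range(max(lengths) + 1)]
  (positions.items.foldl (fun r p =>
    let lengths := pvGapLens p.2
    let c := PySem.Dict.counter lengths
    r.insert p.1 ((PySem.List.pyRange 0 ((PySem.List.max? lengths (fun x => x)).getD 0 + 1) 1).map
      (fun i => c.getD i 0))) (PySem.Dict.empty : PySem.Dict String (List Int))).items

-- ===== PRECONDITION & SPEC =====
def Spec_collect_subsequence_frequencies (tags_sequence_extracted : List String) (out : List (String × List Int)) : Prop := out = collect_subsequence_frequencies_alt tags_sequence_extracted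
instance (tags_sequence_extracted : List String) (out : List (String × List Int)) : Decidable (Spec_collect_subsequence_frequencies tags_sequence_extracted out) := by unfold Spec_collect_subsequence_frequencies; infer_instance

-- ===== CLAIM (what is proved, stated in full; the proofs are below) =====
def Claim_equal_collect_subsequence_frequencies : Prop := ∀ (tags_sequence_extracted : List String), Dom_collect_subsequence_frequencies tags_sequence_extracted → Spec_collect_subsequence_frequencies tags_sequence_extracted (collect_subsequence_frequencies tags_sequence_extracted)


-- ===== LEMMAS AND PROOFS =====

-- the run-length list ("squoshed" list) computed from loop state (prev, len), flush included
def pvRunsAux : List String → Option String → Int → List (String × Int)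
  | [], prev, len => if len ≠ 0 then [(prev.getD "", len)] else []
  | c :: rest, prev, len =>
    if prev = none ∨ some c = prev then pvRunsAux rest (some c) (len + 1)
    else (prev.getD "", len) :: pvRunsAux rest (some c) 1

theorem sle_eq_runsAux_aux (rest : List String) : ∀ (prev : Option String) (len : Int)
    (acc : List (String × Int)),
    (if (pvSleLoop rest prev len acc).2.2 ≠ 0 then
      (pvSleLoop rest prev len acc).1 ++ [((pvSleLoop rest prev len acc).2.1.getD "", (pvSleLoop rest prev len acc).2.2)]
     else (pvSleLoop rest prev len acc).1) = acc ++ pvRunsAux rest prev len := by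
  induction rest with
  | nil =>
    intro prev len acc
    simp only [pvSleLoop, pvRunsAux]
    split_ifs <;> simp
  | cons c rest ih =>
    intro prev len acc
    by_cases h : prev = none ∨ some c = prev
    · simp only [pvSleLoop, pvRunsAux, if_pos h]
      exact ih (some c) (len + 1) acc
    · simp only [pvSleLoop, pvRunsAux, if_neg h]
      rw [ih (some c) 1 (acc ++ [(prev.getD "", len)])]
      simp

theorem sle_eq_runsAux (ts : List String) :
    subsequences_lengths_extractor ts = pvRunsAux ts none 0 := by
  have h := sle_eq_runsAux_aux ts none 0 []
  simpa [subsequences_lengths_extractor] using h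

theorem runsAux_pos (rest : List String) : ∀ (p : String) (len : Int), 1 ≤ len →
    ∀ q ∈ pvRunsAux rest (some p) len, 1 ≤ q.2 := by
  induction rest with
  | nil =>
    intro p len hlen q hq
    simp only [pvRunsAux] at hq
    rw [if_pos (by omega)] at hq
    simp at hq
    simp [hq]
    omega
  | cons c rest ih =>
    intro p len hlen q hq
    by_cases h : (some p : Option String) = none ∨ some c = some p
    · rw [pvRunsAux, if_pos h] at hq
      exact ih c (len + 1) (by omega) q hq
    · rw [pvRunsAux, if_neg h] at hq
      rcases List.mem_cons.mp hq with h1 | h2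
      · simp [h1]; omega
      · exact ih c 1 (by omega) q h2

theorem runs_pos (ts : List String) : ∀ q ∈ pvRunsAux ts none 0, 1 ≤ q.2 := by
  cases ts with
  | nil => intro q hq; simp [pvRunsAux] at hq
  | cons c rest =>
    intro q hq
    rw [pvRunsAux, if_pos (Or.inl rfl)] at hq
    exact runsAux_pos rest c 1 le_rfl q hq

-- tag_types is the ordered dedup of the run tags
theorem tagTypes_eq_set (sq : List (String × Int)) :
    collect_tag_types sq = PySem.Set.ofList (sq.map (·.1)) := by
  rw [collect_tag_types, PySem.Set.ofList_eq_foldl, List.foldl_map]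
  refine PySem.List.foldl_congr_mem _ _ _ _ ?_
  intro acc q _
  by_cases h : q.1 ∈ acc <;> simp [PySem.Set.add, PySem.Set.contains, h]

-- the run lengths of tag t, in order
def pvLens (t : String) (sq : List (String × Int)) : List Int :=
  (sq.filter (fun q => q.1 == t)).map (·.2)

theorem getD_foldl_updA (sq : List (String × Int)) : ∀ (d : PySem.Dict String (PySem.Dict Int Int)) (t : String),
    (sq.foldl (fun d q => d.modify q.1 PySem.Dict.empty (fun c => c.modify q.2 0 (· + 1))) d).getD t PySem.Dict.empty =
      (pvLens t sq).foldl (fun c l => c.modify l 0 (· + 1)) (d.getD t PySem.Dict.empty) := by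
  induction sq with
  | nil => intro d t; rfl
  | cons q sq ih =>
    intro d t
    simp only [List.foldl_cons, pvLens, List.filter_cons]
    by_cases h : q.1 = t
    · rw [if_pos (by simp [h])]
      simp only [List.map_cons, List.foldl_cons]
      rw [ih]
      simp only [PySem.Dict.getD_modify]
      rw [if_pos h.symm, h]
      simp [pvLens]
    · rw [if_neg (by simp [h])]
      rw [ih]
      simp only [PySem.Dict.getD_modify]
      rw [if_neg (fun hh => h hh.symm)]
      rfl

theorem getD_counters0 (ts : List String) : ∀ (d : PySem.Dict String (PySem.Dict Int Int)) (t : String),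
    (∀ x, d.getD x PySem.Dict.empty = PySem.Dict.empty) →
    (ts.foldl (fun d t => d.insert t PySem.Dict.empty) d).getD t PySem.Dict.empty = PySem.Dict.empty := by
  induction ts with
  | nil => intro d t hd; exact hd t
  | cons x ts ih =>
    intro d t hd
    simp only [List.foldl_cons]
    refine ih _ t ?_
    intro y
    rw [PySem.Dict.getD_insert]
    split_ifs <;> simp [hd]

theorem map_range_getD (v : List Int) : (List.range v.length).map (fun j => v.getD j 0) = v := by
  apply List.ext_getElem
  · simp
  · intro i h1 h2
    simp [List.getElem?_eq_getElem h2]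

-- folding index assignments of in-range keys = lookup per index
theorem foldl_setAt (S : List Int) : ∀ (cnt : Int → Int) (v : List Int),
    (∀ k ∈ S, 0 ≤ k ∧ k < (v.length : Int)) →
    (S.map (fun k => (k, cnt k))).foldl (fun v p => pvSetAt v p.1 p.2) v =
      (List.range v.length).map (fun (j : Nat) => if (j : Int) ∈ S then cnt (j : Int) else v.getD j 0) := by
  induction S with
  | nil =>
    intro cnt v _
    simpa using (map_range_getD v).symm
  | cons k S ih =>
    intro cnt v hb
    simp only [List.map_cons, List.foldl_cons]
    have hlen : (pvSetAt v k (cnt k)).length = v.length := by simp [pvSetAt]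
    rw [ih cnt (pvSetAt v k (cnt k)) (by
      intro k' hk'
      rw [hlen]
      exact hb k' (List.mem_cons_of_mem _ hk')), hlen]
    apply List.map_congr_left
    intro j hj
    have hjv : j < v.length := List.mem_range.mp hj
    have hget : (pvSetAt v k (cnt k)).getD j 0 = if (j : Int) = k then cnt k else v.getD j 0 := by
      rw [List.getD_eq_getElem _ 0 (by rw [hlen]; exact hjv)]
      simp only [pvSetAt, List.getElem_mapIdx]
      by_cases hk : (j : Int) = k
      · rw [if_pos hk, if_pos hk]
      · rw [if_neg hk, if_neg hk, List.getD_eq_getElem _ 0 hjv]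
    by_cases hS : (j : Int) ∈ S
    · rw [if_pos hS, if_pos (List.mem_cons_of_mem _ hS)]
    · rw [if_neg hS, hget]
      by_cases hk : (j : Int) = k
      · rw [if_pos hk, if_pos (by simp [hk]), hk]
      · rw [if_neg hk, if_neg (by simp [hS, hk])]

-- the frequency vector of a counter of positive lengths, computed either way
theorem vec_eq (ls : List Int) (hpos : ∀ x ∈ ls, 1 ≤ x) :
    convert_to_frequency_vector (PySem.Dict.counter ls) =
      (PySem.List.pyRange 0 ((PySem.List.max? (PySem.Dict.counter ls).keys (fun x => x)).getD 0 + 1) 1).map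
        (fun i => (PySem.Dict.counter ls).getD i 0) := by
  cases ls with
  | nil => decide
  | cons a as =>
    have hmem : a ∈ PySem.Set.ofList (a :: as) := (PySem.Set.mem_ofList _ _).mpr (by simp)
    obtain ⟨m0, hm0⟩ : ∃ m0, PySem.List.max? (PySem.Set.ofList (a :: as)) (fun x => x) = some m0 := by
      cases h : PySem.List.max? (PySem.Set.ofList (a :: as)) (fun x => x) with
      | none =>
        rw [PySem.List.max?_eq_none_iff] at h
        rw [h] at hmem
        exact absurd hmem (by simp)
      | some m0 => exact ⟨m0, rfl⟩
    have hpos' : ∀ k ∈ PySem.Set.ofList (a :: as), 1 ≤ k := by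
      intro k hk
      exact hpos k ((PySem.Set.mem_ofList _ _).mp hk)
    have hm0pos : 1 ≤ m0 := hpos' m0 (PySem.List.max?_mem hm0)
    have hm0n : m0 = ((m0.toNat : Nat) : Int) := by omega
    rw [convert_to_frequency_vector, PySem.Dict.keys_counter, hm0, PySem.Dict.items_counter]
    simp only [Option.getD_some]
    have hrange : m0 + 1 = ((m0.toNat + 1 : Nat) : Int) := by omega
    rw [hrange, PySem.List.pyRange_zero_natCast]
    rw [foldl_setAt _ _ _ (by
      intro k hk
      have hk1 : 1 ≤ k := hpos' k hk
      have hk2 : k ≤ m0 := PySem.List.max?_isMax hm0 k hk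
      constructor
      · omega
      · simp only [List.length_map, List.length_range]
        omega)]
    simp only [List.length_map, List.length_range, List.map_map]
    apply List.map_congr_left
    intro j hj
    simp only [Function.comp]
    rw [PySem.Dict.getD_counter]
    by_cases hS : (j : Int) ∈ PySem.Set.ofList (a :: as)
    · rw [if_pos hS]
    · rw [if_neg hS]
      have hnm : (j : Int) ∉ (a :: as) := fun hc => hS ((PySem.Set.mem_ofList _ _).mpr hc)
      rw [List.count_eq_zero.mpr hnm]
      simp [List.getElem?_range (List.mem_range.mp hj)]

-- ---------- B-side lemmas ----------

-- positions of tag t in ts starting at index i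
def pvPosAux (t : String) : List String → Int → List Int
  | [], _ => []
  | s :: rest, i => if s = t then i :: pvPosAux t rest (i + 1) else pvPosAux t rest (i + 1)

-- gap-splitting of a position list: state (start of current group, previous position)
def pvGl (start prev : Int) : List Int → List Int
  | [] => [prev - start + 1]
  | c :: rest => if c = prev + 1 then pvGl start c rest else (prev - start + 1) :: pvGl c c rest

def pvGlStart : List Int → List Int
  | [] => []
  | c :: rest => pvGl c c rest

theorem gapLoop_corr (rest : List Int) : ∀ (prev start : Int) (acc : List Int),
    (pvGapLoop ((prev :: rest).zip rest) start acc).1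
      ++ [((prev :: rest).getLast?).getD 0 - (pvGapLoop ((prev :: rest).zip rest) start acc).2 + 1]
      = acc ++ pvGl start prev rest := by
  induction rest with
  | nil => intro prev start acc; simp [pvGapLoop, pvGl]
  | cons c rest ih =>
    intro prev start acc
    have hzip : (prev :: c :: rest).zip (c :: rest) = (prev, c) :: (c :: rest).zip rest := rfl
    rw [hzip, List.getLast?_cons_cons]
    by_cases h : c = prev + 1
    · simp only [pvGapLoop]
      rw [if_neg (not_not_intro h)]
      rw [ih c start acc, pvGl, if_pos h]
    · simp only [pvGapLoop]
      rw [if_pos h]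
      rw [ih c c (acc ++ [prev - start + 1]), pvGl, if_neg h]
      simp

theorem gapLens_eq_glStart (p : Int) (ps : List Int) :
    pvGapLens (p :: ps) = pvGlStart (p :: ps) := by
  rw [pvGapLens]
  have h1 : (PySem.List.pyGet? (p :: ps) 0).getD 0 = p := by
    simp [PySem.List.pyGet?_zero]
  simp only [h1, PySem.List.pyGet?_neg_one, List.tail_cons]
  have := gapLoop_corr ps p p []
  simpa [pvGlStart] using this

theorem posAux_ge (t : String) (ts : List String) : ∀ (i : Int) (x : Int),
    x ∈ pvPosAux t ts i → i ≤ x := by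
  induction ts with
  | nil => intro i x hx; simp [pvPosAux] at hx
  | cons s rest ih =>
    intro i x hx
    rw [pvPosAux] at hx
    split_ifs at hx with h
    · rcases List.mem_cons.mp hx with rfl | hx'
      · omega
      · have := ih (i + 1) x hx'; omega
    · have := ih (i + 1) x hx; omega

theorem gl_skip (start prev : Int) (ps : List Int) (h : ∀ x ∈ ps, prev + 1 < x) :
    pvGl start prev ps = (prev - start + 1) :: pvGlStart ps := by
  cases ps with
  | nil => rfl
  | cons c rest =>
    rw [pvGl, if_neg (by have := h c (by simp); omega)]
    rfl

-- the core: gap-splitting the positions of t yields t's run lengths, in order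
theorem core (ts : List String) : ∀ (t p : String) (len i : Int), 1 ≤ len →
    (p = t → pvGl (i - len) (i - 1) (pvPosAux t ts i) = pvLens t (pvRunsAux ts (some p) len)) ∧
    (p ≠ t → pvGlStart (pvPosAux t ts i) = pvLens t (pvRunsAux ts (some p) len)) := by
  induction ts with
  | nil =>
    intro t p len i hlen
    constructor
    · intro hpt
      subst hpt
      rw [pvRunsAux, if_pos (by omega)]
      simp [pvPosAux, pvGl, pvLens]
    · intro hpt
      rw [pvRunsAux, if_pos (by omega)]
      simp [pvPosAux, pvGlStart, pvLens, hpt]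
  | cons c rest ih =>
    intro t p len i hlen
    by_cases hcp : c = p
    · -- run continues
      subst hcp
      rw [pvRunsAux, if_pos (Or.inr rfl)]
      constructor
      · intro hpt
        subst hpt
        rw [pvPosAux, if_pos rfl, pvGl, if_pos (by omega)]
        have := (ih c c (len + 1) (i + 1) (by omega)).1 rfl
        simpa using this
      · intro hpt
        rw [pvPosAux, if_neg hpt]
        exact (ih t c (len + 1) (i + 1) (by omega)).2 hpt
    · -- run ends, new run (c, 1)
      rw [pvRunsAux, if_neg (by simp [hcp])]
      simp only [Option.getD_some]
      constructor
      · intro hpt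
        subst hpt
        -- c ≠ t, current t-run flushes with length len
        rw [pvPosAux, if_neg hcp]
        rw [gl_skip _ _ _ (by
          intro x hx
          have := posAux_ge p rest (i + 1) x hx
          omega)]
        have h2 := (ih p c 1 (i + 1) le_rfl).2 (fun h => hcp h)
        rw [h2]
        simp only [pvLens, List.filter_cons, List.map_cons]
        rw [if_pos (by simp)]
        simp only [List.map_cons]
        congr 1
        omega
      · intro hpt
        have hfilter : pvLens t ((p, len) :: pvRunsAux rest (some c) 1) =
            pvLens t (pvRunsAux rest (some c) 1) := by
          simp only [pvLens, List.filter_cons]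
          rw [if_neg (by simp [hpt])]
        rw [hfilter]
        by_cases hct : c = t
        · subst hct
          rw [pvPosAux, if_pos rfl]
          have := (ih c c 1 (i + 1) le_rfl).1 rfl
          simpa [pvGlStart] using this
        · rw [pvPosAux, if_neg hct]
          exact (ih t c 1 (i + 1) le_rfl).2 hct

theorem glStart_pos_eq_lens (ts : List String) (t : String) :
    pvGlStart (pvPosAux t ts 0) = pvLens t (pvRunsAux ts none 0) := by
  cases ts with
  | nil => rfl
  | cons c rest =>
    rw [pvRunsAux, if_pos (Or.inl rfl)]
    by_cases hct : c = t
    · subst hct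
      rw [pvPosAux, if_pos rfl]
      have := (core rest c c 1 1 le_rfl).1 rfl
      simpa [pvGlStart] using this
    · rw [pvPosAux, if_neg hct]
      exact (core rest t c 1 1 le_rfl).2 hct

-- positions dict lookups
theorem getD_pos_fold (l : List (Int × String)) : ∀ (d : PySem.Dict String (List Int)) (t : String),
    (l.foldl (fun d p => d.insert p.2 (d.getD p.2 [] ++ [p.1])) d).getD t [] =
      d.getD t [] ++ (l.filter (fun p => p.2 == t)).map (·.1) := by
  induction l with
  | nil => intro d t; simp
  | cons q l ih =>
    intro d t
    simp only [List.foldl_cons, List.filter_cons]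
    by_cases h : q.2 = t
    · rw [if_pos (by simp [h])]
      rw [ih]
      simp only [PySem.Dict.getD_insert, if_pos h.symm]
      simp [h]
    · rw [if_neg (by simp [h])]
      rw [ih]
      simp only [PySem.Dict.getD_insert]
      rw [if_neg (fun hh => h hh.symm)]

theorem filter_enumerate_eq_posAux (t : String) (ts : List String) : ∀ (i : Int),
    ((PySem.List.enumerate ts i).filter (fun p => p.2 == t)).map (·.1) = pvPosAux t ts i := by
  induction ts with
  | nil => intro i; simp [PySem.List.enumerate_nil, pvPosAux]
  | cons s rest ih =>
    intro i
    rw [PySem.List.enumerate_cons, pvPosAux, List.filter_cons]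
    by_cases h : s = t
    · rw [if_pos (by simp [h]), if_pos h]
      simp [ih]
    · rw [if_neg (by simp [h]), if_neg h]
      exact ih (i + 1)

theorem getD_positions (ts : List String) (t : String) :
    (pvPositions ts).getD t [] = pvPosAux t ts 0 := by
  rw [pvPositions, getD_pos_fold, filter_enumerate_eq_posAux]
  simp [PySem.Dict.getD_empty]

theorem keys_positions (ts : List String) :
    (pvPositions ts).keys = PySem.Set.ofList ts := by
  rw [pvPositions, PySem.Dict.keys_foldl_insert_key, PySem.List.map_snd_enumerate,
    PySem.Dict.keys_empty]
  rw [PySem.Set.ofList_eq_foldl]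
  rfl

theorem nodup_keys_positions (ts : List String) : (pvPositions ts).keys.Nodup := by
  rw [pvPositions]
  exact PySem.Dict.nodup_keys_foldl_insert_key _ _ _ _ PySem.Dict.nodup_keys_empty

-- the run tags dedup to the tags themselves
theorem runs_tags_fold (ts : List String) : ∀ (p : String) (len : Int) (acc : List String),
    1 ≤ len →
    List.foldl PySem.Set.add acc ((pvRunsAux ts (some p) len).map (·.1)) =
      List.foldl PySem.Set.add (PySem.Set.add acc p) ts := by
  induction ts with
  | nil =>
    intro p len acc hlen
    rw [pvRunsAux, if_pos (by omega)]
    simp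
  | cons c rest ih =>
    intro p len acc hlen
    by_cases hcp : c = p
    · subst hcp
      rw [pvRunsAux, if_pos (Or.inr rfl)]
      rw [ih c (len + 1) acc (by omega)]
      simp only [List.foldl_cons]
      have h2 : PySem.Set.add (PySem.Set.add acc c) c = PySem.Set.add acc c := by
        by_cases hc : c ∈ acc <;>
          simp [PySem.Set.add, PySem.Set.contains, hc]
      rw [h2]
    · rw [pvRunsAux, if_neg (by simp [hcp])]
      simp only [Option.getD_some, List.map_cons, List.foldl_cons]
      rw [ih c 1 (PySem.Set.add acc p) le_rfl]

theorem runs_tags_dedup (ts : List String) :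
    PySem.Set.ofList ((pvRunsAux ts none 0).map (·.1)) = PySem.Set.ofList ts := by
  cases ts with
  | nil => rfl
  | cons c rest =>
    rw [pvRunsAux, if_pos (Or.inl rfl)]
    rw [PySem.Set.ofList_eq_foldl, PySem.Set.ofList_eq_foldl]
    simp only [List.foldl_cons, zero_add]
    exact runs_tags_fold rest c 1 PySem.Set.empty le_rfl

-- max over a list = max over its dedup (Int values, identity key)
theorem max?_ofList_eq (ls : List Int) (h : ls ≠ []) :
    PySem.List.max? (PySem.Set.ofList ls) (fun x => x) = PySem.List.max? ls (fun x => x) := by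
  obtain ⟨m1, hm1⟩ : ∃ m1, PySem.List.max? ls (fun x => x) = some m1 := by
    cases hh : PySem.List.max? ls (fun x => x) with
    | none =>
      rw [PySem.List.max?_eq_none_iff] at hh
      exact absurd hh h
    | some m1 => exact ⟨m1, rfl⟩
  obtain ⟨m2, hm2⟩ : ∃ m2, PySem.List.max? (PySem.Set.ofList ls) (fun x => x) = some m2 := by
    cases hh : PySem.List.max? (PySem.Set.ofList ls) (fun x => x) with
    | none =>
      rw [PySem.List.max?_eq_none_iff] at hh
      cases ls with
      | nil => exact absurd rfl h
      | cons a as =>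
        have : a ∈ PySem.Set.ofList (a :: as) := (PySem.Set.mem_ofList _ _).mpr (by simp)
        rw [hh] at this
        exact absurd this (by simp)
    | some m2 => exact ⟨m2, rfl⟩
  rw [hm1, hm2]
  have h1m : m1 ∈ ls := PySem.List.max?_mem hm1
  have h2m : m2 ∈ ls := (PySem.Set.mem_ofList _ _).mp (PySem.List.max?_mem hm2)
  have h12 : m1 ≤ m2 := PySem.List.max?_isMax hm2 m1 ((PySem.Set.mem_ofList _ _).mpr h1m)
  have h21 : m2 ≤ m1 := PySem.List.max?_isMax hm1 m2 h2m
  have : m1 = m2 := le_antisymm h12 h21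
  rw [this]

theorem posAux_ne_nil (t : String) (ts : List String) (hmem : t ∈ ts) : ∀ (i : Int),
    pvPosAux t ts i ≠ [] := by
  induction ts with
  | nil => exact absurd hmem (by simp)
  | cons s rest ih =>
    intro i
    rw [pvPosAux]
    by_cases h : s = t
    · rw [if_pos h]; simp
    · rw [if_neg h]
      exact ih (by rcases List.mem_cons.mp hmem with rfl | hr; exact absurd rfl h; exact hr) (i + 1)

theorem gl_ne_nil (rest : List Int) : ∀ (start prev : Int), pvGl start prev rest ≠ [] := by
  induction rest with
  | nil => intro s p; simp [pvGl]
  | cons d rest ih =>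
    intro s p
    rw [pvGl]
    split_ifs
    · exact ih s d
    · simp

theorem glStart_ne_nil (ps : List Int) (h : ps ≠ []) : pvGlStart ps ≠ [] := by
  cases ps with
  | nil => exact absurd rfl h
  | cons c rest => exact gl_ne_nil rest c c

-- ===== VERDICT (by name: the statement is the Claim_ definition above) =====
theorem collect_subsequence_frequencies_spec : Claim_equal_collect_subsequence_frequencies := by
  intro ts _
  unfold Spec_collect_subsequence_frequencies
  simp only [collect_subsequence_frequencies, collect_subsequence_frequencies_alt]
  rw [sle_eq_runsAux, tagTypes_eq_set]
  -- A side: items = map over the deduped run tags of the per-tag vector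
  have hgetA : ∀ t, ((pvRunsAux ts none 0).foldl
      (fun d q => d.modify q.1 PySem.Dict.empty (fun c => c.modify q.2 0 (· + 1)))
      ((PySem.Set.ofList ts).foldl
        (fun d t => d.insert t PySem.Dict.empty) PySem.Dict.empty)).getD t PySem.Dict.empty =
      PySem.Dict.counter (pvLens t (pvRunsAux ts none 0)) := by
    intro t
    rw [getD_foldl_updA, getD_counters0 _ _ t (fun x => PySem.Dict.getD_empty x _)]
    exact (PySem.Dict.counter_eq_foldl _).symm
  rw [PySem.Dict.items_foldl_insert_fresh _ (fun t => t)
      (fun t => convert_to_frequency_vector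
        (((pvRunsAux ts none 0).foldl
          (fun d q => d.modify q.1 PySem.Dict.empty (fun c => c.modify q.2 0 (· + 1)))
          ((PySem.Set.ofList ((pvRunsAux ts none 0).map (·.1))).foldl
            (fun d t => d.insert t PySem.Dict.empty) PySem.Dict.empty)).getD t PySem.Dict.empty))
      PySem.Dict.empty
      (fun a _ => PySem.Dict.contains_empty a)
      (by simp only [List.map_id_fun', id]; exact PySem.Set.nodup_ofList ((pvRunsAux ts none 0).map (·.1)))]
  -- B side: items of the result dict = map over the deduped tags of the per-tag vector
  rw [PySem.Dict.items_eq_map_keys (pvPositions ts) (nodup_keys_positions ts) [],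
    keys_positions ts]
  rw [PySem.Dict.items_foldl_insert_fresh
      ((PySem.Set.ofList ts).map (fun k => (k, (pvPositions ts).getD k [])))
      (fun (p : String × List Int) => p.1)
      (fun (p : String × List Int) =>
        (PySem.List.pyRange 0 ((PySem.List.max? (pvGapLens p.2) (fun x => x)).getD 0 + 1) 1).map
          (fun i => (PySem.Dict.counter (pvGapLens p.2)).getD i 0))
      PySem.Dict.empty
      (fun a _ => PySem.Dict.contains_empty a.1)
      (by
        rw [List.map_map]
        have hc : ((fun (p : String × List Int) => p.1) ∘ fun k => (k, (pvPositions ts).getD k [])) = id := rfl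
        rw [hc, List.map_id]
        exact PySem.Set.nodup_ofList ts)]
  have hie : (PySem.Dict.empty : PySem.Dict String (List Int)).items = [] := rfl
  rw [hie, List.nil_append, List.nil_append, List.map_map, runs_tags_dedup]
  apply List.map_congr_left
  intro t ht
  have htm : t ∈ ts := (PySem.Set.mem_ofList _ _).mp ht
  simp only [Function.comp]
  rw [hgetA t, getD_positions ts t]
  -- the gap lengths equal the run lengths
  obtain ⟨p0, ps0, hps⟩ : ∃ p0 ps0, pvPosAux t ts 0 = p0 :: ps0 := by
    cases hp : pvPosAux t ts 0 with
    | nil => exact absurd hp (posAux_ne_nil t ts htm 0)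
    | cons p0 ps0 => exact ⟨p0, ps0, rfl⟩
  have hlens : pvGapLens (pvPosAux t ts 0) = pvLens t (pvRunsAux ts none 0) := by
    rw [hps, gapLens_eq_glStart, ← hps]
    exact glStart_pos_eq_lens ts t
  have hne : pvLens t (pvRunsAux ts none 0) ≠ [] := by
    rw [← hlens, hps, gapLens_eq_glStart]
    exact glStart_ne_nil _ (by simp)
  have hpos : ∀ x ∈ pvLens t (pvRunsAux ts none 0), 1 ≤ x := by
    intro x hx
    simp only [pvLens, List.mem_map, List.mem_filter] at hx
    obtain ⟨q, ⟨hq, _⟩, rfl⟩ := hx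
    exact runs_pos ts q hq
  rw [hlens, vec_eq _ hpos, PySem.Dict.keys_counter, max?_ofList_eq _ hne]
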